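-- pv_equiv track=rewrite | github.com/hedge0207/algorithm | leetcode/3719_Longest_Balanced_Subarray_I.py | longestBalanced
-- ===== SOURCE A (Python) =====
-- def longestBalanced(nums: list[int]) -> int:
--     ans = 0
--     for i in range(len(nums)):
--         num_odd = 1 if nums[i] % 2 else 0
--         num_even = 0 if nums[i] % 2 else 1
--         distinct_nums = {nums[i]}
--         for j in range(i+1, len(nums)):
--             if nums[j] not in distinct_nums:
--                 if nums[j] % 2 == 1:
--                     num_odd += 1
--                 else:
--                     num_even += 1
--             distinct_nums.add(nums[j])
--             if num_odd == num_even: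
--                 ans = max(ans, j-i+1)
--     return ans
-- ===== SOURCE B (Python) =====
-- def longestBalanced(nums: list[int]) -> int:
--     ans = 0
--     n = len(nums)
--     for i in range(n):
--         for j in range(i, n):
--             s = set(nums[i:j + 1])
--             odds = sum(1 for x in s if x % 2 == 1)
--             evens = len(s) - odds
--             if odds == evens:
--                 ans = max(ans, j - i + 1)
--     return ans
-- ===== Notes on version B (the rewrite author's own statement) =====
-- stated objective: alternative
-- what changed: B rebuilds the distinct-value set of each subarray nums[i:j+1] from the slice and counts odds/evens on it per window, instead of maintaining a running set with incremental parity counters inside the inner loop.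
import Mathlib
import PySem

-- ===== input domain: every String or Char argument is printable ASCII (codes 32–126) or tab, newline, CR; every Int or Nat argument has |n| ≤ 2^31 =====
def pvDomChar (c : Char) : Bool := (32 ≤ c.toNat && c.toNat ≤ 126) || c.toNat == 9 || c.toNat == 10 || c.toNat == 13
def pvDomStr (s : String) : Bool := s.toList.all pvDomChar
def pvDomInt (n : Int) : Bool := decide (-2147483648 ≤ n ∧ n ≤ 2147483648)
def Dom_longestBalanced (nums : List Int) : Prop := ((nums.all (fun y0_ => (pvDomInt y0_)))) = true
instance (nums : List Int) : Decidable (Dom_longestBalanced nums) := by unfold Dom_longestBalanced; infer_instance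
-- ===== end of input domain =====

-- B rebuilds the distinct-value set of each subarray from the slice and counts parities per window,
-- instead of A's running set with incremental parity counters (alternative decomposition, not faster).


-- ===== PORT A =====
-- indices produced by pyRange over [0, len) resp. [i+1, len) are in range, so pyGetD is exact here
def longestBalanced (nums : List Int) : Int :=
  (PySem.List.pyRange 0 (nums.length : Int) 1).foldl (fun ans i =>
    let xi := PySem.List.pyGetD nums i 0
    let st : Int × Int × PySem.Set Int × Int :=
      (PySem.List.pyRange (i + 1) (nums.length : Int) 1).foldl
        (fun st j =>
          let xj := PySem.List.pyGetD nums j 0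
          let p : Int × Int :=
            if ¬ PySem.Set.contains st.2.2.1 xj then
              (if PySem.Int.mod xj 2 = 1 then (st.1 + 1, st.2.1) else (st.1, st.2.1 + 1))
            else (st.1, st.2.1)
          (p.1, p.2, PySem.Set.add st.2.2.1 xj,
            if p.1 = p.2 then max st.2.2.2 (j - i + 1) else st.2.2.2))
        ((if PySem.Int.mod xi 2 ≠ 0 then 1 else 0),
         (if PySem.Int.mod xi 2 ≠ 0 then 0 else 1),
         PySem.Set.ofList [xi], ans)
    st.2.2.2) 0

-- ===== PORT B =====
-- counting over the set is order-independent, so consuming the PySem.Set element list is exact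
def longestBalanced_alt (nums : List Int) : Int :=
  (PySem.List.pyRange 0 (nums.length : Int) 1).foldl (fun ans i =>
    (PySem.List.pyRange i (nums.length : Int) 1).foldl (fun ans j =>
      let s : PySem.Set Int := PySem.Set.ofList (PySem.List.slice nums (some i) (some (j + 1)))
      let odds : Int := ((s.filter (fun x => PySem.Int.mod x 2 = 1)).length : Int)
      let evens : Int := (s.length : Int) - odds
      if odds = evens then max ans (j - i + 1) else ans) ans) 0

-- ===== PRECONDITION & SPEC =====
def Spec_longestBalanced (nums : List Int) (out : Int) : Prop := out = longestBalanced_alt nums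
instance (nums : List Int) (out : Int) : Decidable (Spec_longestBalanced nums out) := by unfold Spec_longestBalanced; infer_instance

-- ===== CLAIM (what is proved, stated in full; the proofs are below) =====
def Claim_equal_longestBalanced : Prop := ∀ (nums : List Int), Dom_longestBalanced nums → Spec_longestBalanced nums (longestBalanced nums)

-- ===== LEMMAS AND PROOFS =====
def pvOdds (s : List Int) : Int := ((s.filter (fun x => PySem.Int.mod x 2 = 1)).length : Int)

def pvWinS (nums : List Int) (a b : Nat) : PySem.Set Int :=
  PySem.Set.ofList ((nums.drop a).take (b - a))

lemma pvWin_succ (nums : List Int) (a b : Nat) (hab : a ≤ b) (hb : b < nums.length) :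
    (nums.drop a).take (b + 1 - a) = (nums.drop a).take (b - a) ++ [nums.getD b 0] := by
  have h1 : b + 1 - a = (b - a) + 1 := by omega
  have hlt : b - a < (nums.drop a).length := by simp; omega
  rw [h1, List.take_add_one, List.getElem?_eq_getElem hlt]
  have : (nums.drop a)[b - a] = nums.getD b 0 := by
    rw [List.getElem_drop, List.getD_eq_getElem]
    · congr 1; omega
    · omega
  simp [this]

lemma pvOfList_append (l : List Int) (x : Int) :
    PySem.Set.ofList (l ++ [x]) = PySem.Set.add (PySem.Set.ofList l) x := by
  simp [PySem.Set.ofList_eq_foldl]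

lemma pvWinS_succ (nums : List Int) (a b : Nat) (hab : a ≤ b) (hb : b < nums.length) :
    pvWinS nums a (b + 1) = PySem.Set.add (pvWinS nums a b) (nums.getD b 0) := by
  rw [pvWinS, pvWin_succ nums a b hab hb, pvOfList_append]; rfl

lemma pvOdds_add (s : PySem.Set Int) (x : Int) :
    pvOdds (PySem.Set.add s x) =
      if x ∈ s then pvOdds s else pvOdds s + (if PySem.Int.mod x 2 = 1 then 1 else 0) := by
  by_cases h : x ∈ s
  · simp [PySem.Set.add, h]
  · have hc : s.contains x = false := by simpa using h
    simp only [PySem.Set.add, hc, Bool.false_eq_true, if_false, if_neg h, pvOdds,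
      List.filter_append, List.length_append, Nat.cast_add]
    congr 1
    by_cases hm : x % 2 = 1 <;> simp [hm]

lemma pvLen_add (s : PySem.Set Int) (x : Int) :
    ((PySem.Set.add s x).length : Int) =
      if x ∈ s then (s.length : Int) else (s.length : Int) + 1 := by
  by_cases h : x ∈ s <;> simp [PySem.Set.add, h]

lemma pv_inner (nums : List Int) (a : Nat) :
    ∀ (m b : Nat), nums.length - b = m → a ≤ b → b ≤ nums.length → ∀ ans : Int,
    ((PySem.List.pyRange (b : Int) (nums.length : Int) 1).foldl
      (fun (st : Int × Int × PySem.Set Int × Int) j =>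
        let xj := PySem.List.pyGetD nums j 0
        let p : Int × Int :=
          if ¬ PySem.Set.contains st.2.2.1 xj then
            (if PySem.Int.mod xj 2 = 1 then (st.1 + 1, st.2.1) else (st.1, st.2.1 + 1))
          else (st.1, st.2.1)
        (p.1, p.2, PySem.Set.add st.2.2.1 xj,
          if p.1 = p.2 then max st.2.2.2 (j - (a : Int) + 1) else st.2.2.2))
      (pvOdds (pvWinS nums a b), ((pvWinS nums a b).length : Int) - pvOdds (pvWinS nums a b),
        pvWinS nums a b, ans)).2.2.2
    = (PySem.List.pyRange (b : Int) (nums.length : Int) 1).foldl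
        (fun ans j =>
          let s : PySem.Set Int := PySem.Set.ofList (PySem.List.slice nums (some (a : Int)) (some (j + 1)))
          let odds : Int := ((s.filter (fun x => PySem.Int.mod x 2 = 1)).length : Int)
          let evens : Int := (s.length : Int) - odds
          if odds = evens then max ans (j - (a : Int) + 1) else ans) ans := by
  intro m
  induction m with
  | zero =>
      intro b hm hab hbn ans
      have hb : b = nums.length := by omega
      subst hb
      rw [PySem.List.pyRange_one_eq_nil (by omega)]
      rfl
  | succ m ih =>
      intro b hm hab hbn ans
      have hb : b < nums.length := by omega
      have hbi : (b : Int) < (nums.length : Int) := by exact_mod_cast hb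
      rw [PySem.List.pyRange_one_cons hbi]
      set F := (fun (st : Int × Int × PySem.Set Int × Int) (j : Int) =>
        let xj := PySem.List.pyGetD nums j 0
        let p : Int × Int :=
          if ¬ PySem.Set.contains st.2.2.1 xj then
            (if PySem.Int.mod xj 2 = 1 then (st.1 + 1, st.2.1) else (st.1, st.2.1 + 1))
          else (st.1, st.2.1)
        (p.1, p.2, PySem.Set.add st.2.2.1 xj,
          if p.1 = p.2 then max st.2.2.2 (j - (a : Int) + 1) else st.2.2.2)) with hF
      set G := (fun (ans : Int) (j : Int) =>
        let s : PySem.Set Int := PySem.Set.ofList (PySem.List.slice nums (some (a : Int)) (some (j + 1)))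
        let odds : Int := ((s.filter (fun x => PySem.Int.mod x 2 = 1)).length : Int)
        let evens : Int := (s.length : Int) - odds
        if odds = evens then max ans (j - (a : Int) + 1) else ans) with hG
      have hcast : ((b + 1 : Nat) : Int) = (b : Int) + 1 := by push_cast; ring
      have hx : PySem.List.pyGetD nums (b : Int) 0 = nums.getD b 0 := by
        simp [PySem.List.pyGetD_natCast]
      have hslice : PySem.List.slice nums (some (a : Int)) (some ((b : Int) + 1))
          = (nums.drop a).take (b + 1 - a) := by
        rw [← hcast, PySem.List.slice_natCast]
      set x := nums.getD b 0 with hxdef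
      have hwin : pvWinS nums a (b + 1) = PySem.Set.add (pvWinS nums a b) x :=
        pvWinS_succ nums a b hab hb
      set s0 := pvWinS nums a b with hs0
      set o0 := pvOdds s0 with ho0
      have hodds : pvOdds (pvWinS nums a (b + 1))
          = if x ∈ s0 then o0 else o0 + (if PySem.Int.mod x 2 = 1 then 1 else 0) := by
        rw [hwin, pvOdds_add]
      have hlen : ((pvWinS nums a (b + 1)).length : Int)
          = if x ∈ s0 then (s0.length : Int) else (s0.length : Int) + 1 := by
        rw [hwin, pvLen_add]
      have hGb : G ans (b : Int)
          = if pvOdds (pvWinS nums a (b + 1))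
               = ((pvWinS nums a (b + 1)).length : Int) - pvOdds (pvWinS nums a (b + 1))
            then max ans ((b : Int) - (a : Int) + 1) else ans := by
        rw [hG]
        simp only [hslice, pvWinS, pvOdds]
        rfl
      have hstep : F (o0, (s0.length : Int) - o0, s0, ans) (b : Int)
          = (pvOdds (pvWinS nums a (b + 1)),
             ((pvWinS nums a (b + 1)).length : Int) - pvOdds (pvWinS nums a (b + 1)),
             pvWinS nums a (b + 1), G ans (b : Int)) := by
        rw [hGb, hF]
        by_cases hmem : x ∈ s0
        · have hcontains : PySem.Set.contains s0 x = true := by simpa [PySem.Set.contains] using hmem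
          have h1 : pvOdds (pvWinS nums a (b + 1)) = o0 := by rw [hodds, if_pos hmem]
          have h2 : ((pvWinS nums a (b + 1)).length : Int) = (s0.length : Int) := by
            rw [hlen, if_pos hmem]
          have h3 : pvWinS nums a (b + 1) = s0 := by
            rw [hwin]; simp [PySem.Set.add, hmem]
          rw [h1, h2, h3]
          simp [hx, hmem]
        · have hcontains : PySem.Set.contains s0 x = false := by simpa [PySem.Set.contains] using hmem
          have h1 : pvOdds (pvWinS nums a (b + 1))
              = o0 + (if PySem.Int.mod x 2 = 1 then 1 else 0) := by rw [hodds, if_neg hmem]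
          have h2 : ((pvWinS nums a (b + 1)).length : Int) = (s0.length : Int) + 1 := by
            rw [hlen, if_neg hmem]
          rw [h1, h2, hwin]
          have e1 : (s0.length : Int) + 1 - (o0 + 1) = (s0.length : Int) - o0 := by ring
          have e0' : (s0.length : Int) + 1 - o0 = (s0.length : Int) - o0 + 1 := by ring
          by_cases hm2 : x % 2 = 1 <;> simp [hx, hmem, hm2, e1, e0']
      rw [List.foldl_cons, List.foldl_cons, hstep, ← hcast]
      exact ih (b + 1) (by omega) (by omega) (by omega) (G ans (b : Int))

lemma pv_singleton_win (nums : List Int) (a : Nat) (ha : a < nums.length) :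
    pvWinS nums a (a + 1) = [nums.getD a 0] := by
  rw [pvWinS, pvWin_succ nums a a (le_refl a) ha]
  simp [PySem.Set.ofList]

lemma pvOdds_singleton (x : Int) :
    pvOdds [x] = if x % 2 = 1 then 1 else 0 := by
  by_cases h : x % 2 = 1 <;> simp [pvOdds, h]

lemma pv_outer_step (nums : List Int) (a : Nat) (ha : a < nums.length) (ans : Int) :
    (let xi := PySem.List.pyGetD nums (a : Int) 0
     let st : Int × Int × PySem.Set Int × Int :=
       (PySem.List.pyRange ((a : Int) + 1) (nums.length : Int) 1).foldl
         (fun st j =>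
           let xj := PySem.List.pyGetD nums j 0
           let p : Int × Int :=
             if ¬ PySem.Set.contains st.2.2.1 xj then
               (if PySem.Int.mod xj 2 = 1 then (st.1 + 1, st.2.1) else (st.1, st.2.1 + 1))
             else (st.1, st.2.1)
           (p.1, p.2, PySem.Set.add st.2.2.1 xj,
             if p.1 = p.2 then max st.2.2.2 (j - (a : Int) + 1) else st.2.2.2))
         ((if PySem.Int.mod xi 2 ≠ 0 then 1 else 0),
          (if PySem.Int.mod xi 2 ≠ 0 then 0 else 1),
          PySem.Set.ofList [xi], ans)
     st.2.2.2)
    = (PySem.List.pyRange (a : Int) (nums.length : Int) 1).foldl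
        (fun ans j =>
          let s : PySem.Set Int := PySem.Set.ofList (PySem.List.slice nums (some (a : Int)) (some (j + 1)))
          let odds : Int := ((s.filter (fun x => PySem.Int.mod x 2 = 1)).length : Int)
          let evens : Int := (s.length : Int) - odds
          if odds = evens then max ans (j - (a : Int) + 1) else ans) ans := by
  have hai : (a : Int) < (nums.length : Int) := by exact_mod_cast ha
  have hcast : ((a + 1 : Nat) : Int) = (a : Int) + 1 := by push_cast; ring
  have hx : PySem.List.pyGetD nums (a : Int) 0 = nums.getD a 0 := by
    simp [PySem.List.pyGetD_natCast]
  set x := nums.getD a 0 with hxdef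
  have hW : pvWinS nums a (a + 1) = [x] := pv_singleton_win nums a ha
  have hmod : x % 2 = 0 ∨ x % 2 = 1 := Int.emod_two_eq_zero_or_one x
  have hmodeq : PySem.Int.mod x 2 = x % 2 :=
    PySem.Int.mod_eq_emod_of_pos (show (0:Int) < 2 by norm_num)
  -- B's first step (the single-element window) never updates ans
  have hslice1 : PySem.List.slice nums (some (a : Int)) (some ((a : Int) + 1))
      = (nums.drop a).take (a + 1 - a) := by
    rw [← hcast, PySem.List.slice_natCast]
  have hB0 : (let s : PySem.Set Int := PySem.Set.ofList (PySem.List.slice nums (some (a : Int)) (some ((a : Int) + 1)))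
      let odds : Int := ((s.filter (fun x => PySem.Int.mod x 2 = 1)).length : Int)
      let evens : Int := (s.length : Int) - odds
      if odds = evens then max ans ((a : Int) - (a : Int) + 1) else ans) = ans := by
    simp only [hslice1]
    have : PySem.Set.ofList ((nums.drop a).take (a + 1 - a)) = [x] := by
      rw [← pvWinS]; exact hW
    simp only [this]
    rcases hmod with h | h <;> simp [h]
  -- A's initial state is the window-(a+1) invariant state
  have hinit : ((if PySem.Int.mod (PySem.List.pyGetD nums (a : Int) 0) 2 ≠ 0 then (1:Int) else 0),
      (if PySem.Int.mod (PySem.List.pyGetD nums (a : Int) 0) 2 ≠ 0 then (0:Int) else 1),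
      PySem.Set.ofList [PySem.List.pyGetD nums (a : Int) 0], ans)
      = (pvOdds (pvWinS nums a (a + 1)),
         ((pvWinS nums a (a + 1)).length : Int) - pvOdds (pvWinS nums a (a + 1)),
         pvWinS nums a (a + 1), ans) := by
    rw [hx, hW, pvOdds_singleton]
    rcases hmod with h | h <;> simp [h, PySem.Set.ofList]
  rw [PySem.List.pyRange_one_cons hai, List.foldl_cons, hB0]
  simp only [hinit]
  rw [← hcast]
  exact pv_inner nums a (nums.length - (a + 1)) (a + 1) rfl (by omega) (by omega) ans

lemma pv_eq : ∀ (nums : List Int), longestBalanced nums = longestBalanced_alt nums := by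
  intro nums
  unfold longestBalanced longestBalanced_alt
  apply PySem.List.foldl_congr_mem'
  intro i hi ans
  obtain ⟨h0, h1⟩ := PySem.List.mem_pyRange_one.mp hi
  have ha : i = ((i.toNat : Nat) : Int) := (Int.toNat_of_nonneg h0).symm
  have hlt : i.toNat < nums.length := by omega
  rw [ha]
  exact pv_outer_step nums i.toNat hlt ans

-- ===== VERDICT (by name: the statement is the Claim_ definition above) =====
theorem longestBalanced_spec : Claim_equal_longestBalanced := by
  intro nums _
  unfold Spec_longestBalanced
  exact pv_eq nums
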